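-- pv_equiv track=rewrite | github.com/bolu-tife/Data-Structures-and-Algorithms | random_leetcode/employee_free_time.py | find_employee_free_time
-- ===== SOURCE A (Python) =====
-- def find_employee_free_time(schedule):
--     if not schedule:
--         return []
--
--     result = []
--     end = schedule[0][1]
--
--     for i in range(1, len(schedule)):
--         curr = schedule[i]
--         if end < curr[0]:
--             result.append([end, curr[0]])
--         end = max(end, curr[1])
--
--     return result
-- ===== SOURCE B (Python) =====
-- def find_employee_free_time(schedule):
--     # Two-pass: materialize the running maximum of interval ends, then emit
--     # a gap wherever that prefix maximum falls below the next start.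
--     prefix = [iv[1] for iv in schedule]
--     for i in range(1, len(prefix)):
--         prefix[i] = max(prefix[i - 1], prefix[i])
--     return [[prefix[i - 1], schedule[i][0]]
--             for i in range(1, len(schedule))
--             if prefix[i - 1] < schedule[i][0]]
-- ===== Notes on version B (the rewrite author's own statement) =====
-- stated objective: alternative
-- what changed: Replaces A's single streaming loop with running end-state by two separately shaped passes: first materialize the prefix-maximum array of interval ends, then a filtered comprehension over consecutive index pairs emits the gaps.
import Mathlib
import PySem

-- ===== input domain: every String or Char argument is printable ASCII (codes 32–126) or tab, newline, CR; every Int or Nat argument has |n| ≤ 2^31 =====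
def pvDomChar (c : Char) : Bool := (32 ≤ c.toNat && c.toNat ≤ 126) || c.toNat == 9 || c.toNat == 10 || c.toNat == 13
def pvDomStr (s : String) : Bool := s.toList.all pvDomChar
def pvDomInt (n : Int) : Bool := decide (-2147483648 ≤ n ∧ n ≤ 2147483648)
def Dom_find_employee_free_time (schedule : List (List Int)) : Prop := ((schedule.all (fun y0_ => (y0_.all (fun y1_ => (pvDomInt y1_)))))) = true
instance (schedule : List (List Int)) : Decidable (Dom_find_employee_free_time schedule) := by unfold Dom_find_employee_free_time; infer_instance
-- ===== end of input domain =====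

-- B replaces A's streaming gap loop by two passes (a materialized prefix-maximum
-- array of interval ends, then a filtered pass over consecutive pairs); same cost,
-- proved to return the same value wherever A returns.


-- ===== PORT A =====
-- A's loop: state (result, end); curr[0]/curr[1] via pyGet? (Pre_ keeps them in range)
def pvALoop : List (List Int) → List (List Int) → Int → List (List Int)
  | [], res, _ => res
  | curr :: t, res, e =>
      let c0 := (PySem.List.pyGet? curr 0).getD 0
      let c1 := (PySem.List.pyGet? curr 1).getD 0
      pvALoop t (if e < c0 then res ++ [[e, c0]] else res) (max e c1)

def find_employee_free_time (schedule : List (List Int)) : List (List Int) :=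
  match schedule with
  | [] => []
  | first :: rest => pvALoop rest [] ((PySem.List.pyGet? first 1).getD 0)

-- ===== PORT B =====
-- B's in-place loop 'prefix[i] = max(prefix[i-1], prefix[i])' as a recursion
def pvPrefixMax : Int → List Int → List Int
  | _, [] => []
  | acc, e :: t => (max acc e) :: pvPrefixMax (max acc e) t

def find_employee_free_time_alt (schedule : List (List Int)) : List (List Int) :=
  let ends := schedule.map (fun iv => (PySem.List.pyGet? iv 1).getD 0)
  let pfx : List Int :=
    match ends with
    | [] => []
    | e :: t => e :: pvPrefixMax e t
  (pfx.zip schedule.tail).filterMap (fun p =>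
    let s := (PySem.List.pyGet? p.2 0).getD 0
    if p.1 < s then some [p.1, s] else none)

-- ===== PRECONDITION & SPEC =====
-- Pre_: exactly the inputs the Python A returns on (A indexes every interval at 0 and 1,
-- so any interval shorter than 2 raises IndexError)
def Pre_find_employee_free_time (schedule : List (List Int)) : Prop :=
  ∀ iv ∈ schedule, 2 ≤ iv.length
instance (schedule : List (List Int)) : Decidable (Pre_find_employee_free_time schedule) := by
  unfold Pre_find_employee_free_time; infer_instance
def pvWitness_find_employee_free_time : List (List Int) := [[1, 3], [5, 6], [2, 4]]

def Spec_find_employee_free_time (schedule : List (List Int)) (out : List (List Int)) : Prop := out = find_employee_free_time_alt schedule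
instance (schedule : List (List Int)) (out : List (List Int)) : Decidable (Spec_find_employee_free_time schedule out) := by unfold Spec_find_employee_free_time; infer_instance

-- ===== CLAIM (what is proved, stated in full; the proofs are below) =====
def Claim_equal_find_employee_free_time : Prop := ∀ (schedule : List (List Int)), Dom_find_employee_free_time schedule → Pre_find_employee_free_time schedule → Spec_find_employee_free_time schedule (find_employee_free_time schedule)

-- ===== LEMMAS AND PROOFS =====

-- the common recursive shape of the gap stream, parameterised by the running end
def pvGaps : Int → List (List Int) → List (List Int)
  | _, [] => []
  | e, curr :: t =>
      let c0 := (PySem.List.pyGet? curr 0).getD 0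
      let c1 := (PySem.List.pyGet? curr 1).getD 0
      (if e < c0 then [[e, c0]] else []) ++ pvGaps (max e c1) t

theorem pvALoop_eq_gaps (rest : List (List Int)) :
    ∀ (res : List (List Int)) (e : Int), pvALoop rest res e = res ++ pvGaps e rest := by
  induction rest with
  | nil => intro res e; simp [pvALoop, pvGaps]
  | cons curr t ih =>
      intro res e
      simp only [pvALoop, pvGaps, ih]
      split <;> simp

theorem pvB_eq_gaps (rest : List (List Int)) :
    ∀ (e : Int),
      (((e :: pvPrefixMax e (rest.map (fun iv => (PySem.List.pyGet? iv 1).getD 0))).zip rest).filterMap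
        (fun p =>
          let s := (PySem.List.pyGet? p.2 0).getD 0
          if p.1 < s then some [p.1, s] else none)) = pvGaps e rest := by
  induction rest with
  | nil => intro e; simp [pvGaps]
  | cons curr t ih =>
      intro e
      by_cases h : e < (PySem.List.pyGet? curr 0).getD 0 <;>
        simp [List.map_cons, pvPrefixMax, List.zip_cons_cons, pvGaps, ih, h]

theorem ports_agree (schedule : List (List Int)) :
    find_employee_free_time schedule = find_employee_free_time_alt schedule := by
  cases schedule with
  | nil => rfl
  | cons first rest =>
      simp only [find_employee_free_time, find_employee_free_time_alt, List.map_cons,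
        List.tail_cons, pvALoop_eq_gaps, List.nil_append, pvB_eq_gaps]

-- ===== VERDICT (by name: the statement is the Claim_ definition above) =====
theorem find_employee_free_time_spec : Claim_equal_find_employee_free_time := by
  intro schedule _ _
  unfold Spec_find_employee_free_time
  exact ports_agree schedule
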